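-- pv_equiv track=rewrite | github.com/pypi-data/pypi-mirror-401 | packages/provide-foundation/provide_foundation-0.3.0.post1.tar.gz/provide_foundation-0.3.0.post1/src/provide/foundation/formatting/grouping.py | format_grouped
-- ===== SOURCE A (Python) =====
-- def format_grouped(
--     text: str,
--     group_size: int = 8,
--     groups: int = 0,
--     separator: str = " ",
-- ) -> str:
--     """Format a string with grouping separators for display.
--
--     Args:
--         text: Text to format
--         group_size: Number of characters per group
--         groups: Number of groups to show (0 for all)
--         separator: Separator between groups
--
--     Returns:
--         Formatted string with groups
--
--     Examples:
--         >>> format_grouped("abc123def456", group_size=4, separator="-")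
--         'abc1-23de-f456'
--         >>> format_grouped("abc123def456", group_size=4, groups=2)
--         'abc1 23de'
--         >>> format_grouped("1234567890abcdef", group_size=4)
--         '1234 5678 90ab cdef'
--
--     """
--     if group_size <= 0:
--         return text
--
--     formatted_parts = []
--     for i in range(0, len(text), group_size):
--         formatted_parts.append(text[i : i + group_size])
--         if groups > 0 and len(formatted_parts) >= groups:
--             break
--
--     return separator.join(formatted_parts)
-- ===== SOURCE B (Python) =====
-- def format_grouped(
--     text: str,
--     group_size: int = 8,
--     groups: int = 0,
--     separator: str = " ",
-- ) -> str:
--     if group_size <= 0: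
--         return text
--     buf = []
--     for i, ch in enumerate(text):
--         if groups > 0 and i // group_size >= groups:
--             break
--         if i > 0 and i % group_size == 0:
--             buf.append(separator)
--         buf.append(ch)
--     return "".join(buf)
-- ===== Notes on version B (the rewrite author's own statement) =====
-- stated objective: alternative
-- what changed: Replaces the chunk-slicing loop (build a list of text[i:i+g] slices, then separator.join) by a single character-level pass over enumerate(text) that derives the group index arithmetically (i // group_size) and interleaves separators into a flat buffer.
import Mathlib
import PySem

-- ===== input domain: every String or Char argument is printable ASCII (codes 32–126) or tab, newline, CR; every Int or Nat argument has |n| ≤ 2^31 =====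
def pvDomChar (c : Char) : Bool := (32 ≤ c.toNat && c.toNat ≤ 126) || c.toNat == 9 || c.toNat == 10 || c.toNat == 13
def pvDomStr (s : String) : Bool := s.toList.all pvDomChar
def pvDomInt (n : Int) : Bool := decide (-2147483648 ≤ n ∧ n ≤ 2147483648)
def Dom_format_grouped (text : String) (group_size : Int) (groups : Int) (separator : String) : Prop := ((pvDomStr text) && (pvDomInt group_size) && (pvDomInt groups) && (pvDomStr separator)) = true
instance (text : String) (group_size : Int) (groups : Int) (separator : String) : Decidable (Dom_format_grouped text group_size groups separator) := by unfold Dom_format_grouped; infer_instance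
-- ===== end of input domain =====

-- B is an alternative single character-level pass (group index by arithmetic) instead of A's
-- list of chunk slices joined at the end; return values proved equal on all inputs.

-- ===== PORT A =====
-- the 'for i in range(0, len(text), group_size): append slice; maybe break' loop;
-- fuel (len text + 1) only makes the recursion total — with step group_size ≥ 1 it never runs out
def fgA_loop (text : List Char) (group_size groups : Int) :
    Nat → Nat → List (List Char) → List (List Char)
  | 0, _, parts => parts
  | fuel + 1, i, parts =>
    if i < text.length then
      let parts' := parts ++ [PySem.List.slice text (some (i : Int)) (some ((i : Int) + group_size))]
      if groups > 0 ∧ groups ≤ (parts'.length : Int) then parts'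
      else fgA_loop text group_size groups fuel (i + group_size.toNat) parts'
    else parts

def format_grouped (text : String) (group_size : Int) (groups : Int) (separator : String) : String :=
  if group_size ≤ 0 then text
  else String.ofList (PySem.Chars.join separator.toList
    (fgA_loop text.toList group_size groups (text.toList.length + 1) 0 []))

-- ===== PORT B =====
-- the 'for i, ch in enumerate(text): maybe break; maybe sep; append ch' loop of Source B
def fgB_loop (group_size groups : Int) (sep : List Char) : List (Int × Char) → List Char
  | [] => []
  | (i, c) :: rest =>
    if groups > 0 ∧ groups ≤ PySem.Int.floordiv i group_size then []
    else (if 0 < i ∧ PySem.Int.mod i group_size = 0 then sep else []) ++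
      c :: fgB_loop group_size groups sep rest

def format_grouped_alt (text : String) (group_size : Int) (groups : Int) (separator : String) : String :=
  if group_size ≤ 0 then text
  else String.ofList (fgB_loop group_size groups separator.toList (PySem.List.enumerate text.toList 0))

-- ===== PRECONDITION & SPEC =====
def Spec_format_grouped (text : String) (group_size : Int) (groups : Int) (separator : String) (out : String) : Prop := out = format_grouped_alt text group_size groups separator
instance (text : String) (group_size : Int) (groups : Int) (separator : String) (out : String) : Decidable (Spec_format_grouped text group_size groups separator out) := by unfold Spec_format_grouped; infer_instance

-- ===== CLAIM (what is proved, stated in full; the proofs are below) =====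
def Claim_equal_format_grouped : Prop := ∀ (text : String) (group_size : Int) (groups : Int) (separator : String), Dom_format_grouped text group_size groups separator → Spec_format_grouped text group_size groups separator (format_grouped text group_size groups separator)

-- ===== LEMMAS AND PROOFS =====

-- canonical chunk decomposition: groups of size gp+1, optionally limited to r remaining groups
def fgChunks (gp : Nat) : Option Nat → List Char → List (List Char)
  | _, [] => []
  | none, c :: cs => (c :: cs).take (gp + 1) :: fgChunks gp none ((c :: cs).drop (gp + 1))
  | some r, c :: cs =>
    if r ≤ 1 then [(c :: cs).take (gp + 1)]
    else (c :: cs).take (gp + 1) :: fgChunks gp (some (r - 1)) ((c :: cs).drop (gp + 1))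
  termination_by _ cs => cs.length
  decreasing_by all_goals (simp [List.length_drop]; try omega)

theorem fgChunks_nil (gp : Nat) (rem : Option Nat) : fgChunks gp rem [] = [] := by
  cases rem <;> simp [fgChunks]

theorem fgChunks_ne_nil (gp : Nat) (rem : Option Nat) (cs : List Char) (h : cs ≠ []) :
    fgChunks gp rem cs ≠ [] := by
  cases cs with
  | nil => exact absurd rfl h
  | cons c cs => cases rem with
    | none => simp [fgChunks]
    | some r => by_cases hr : r ≤ 1 <;> simp [fgChunks, hr]

theorem fgA_loop_eq (text : List Char) (gs groups : Int) (gp : Nat)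
    (hgp : gs = ((gp + 1 : Nat) : Int)) :
    ∀ (fuel i : Nat) (parts : List (List Char)),
      text.length ≤ i + fuel → (0 < groups → (parts.length : Int) < groups) →
      fgA_loop text gs groups fuel i parts =
        parts ++ fgChunks gp
          (if 0 < groups then some (groups.toNat - parts.length) else none)
          (text.drop i) := by
  intro fuel
  induction fuel with
  | zero =>
    intro i parts hlen hinv
    have hd : text.drop i = [] := List.drop_eq_nil_of_le (by omega)
    simp [fgA_loop, hd, fgChunks_nil]
  | succ fuel ih =>
    intro i parts hlen hinv
    by_cases hi : i < text.length
    · have hslice : PySem.List.slice text (some (i : Int)) (some ((i : Int) + gs)) =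
          (text.drop i).take (gp + 1) := by
        rw [hgp]
        exact PySem.List.slice_natCast_add text i (gp + 1)
      rcases hd : text.drop i with _ | ⟨c, cs⟩
      · exact absurd (List.drop_eq_nil_iff.mp hd) (by omega)
      have hdd : (c :: cs).drop (gp + 1) = text.drop (i + (gp + 1)) := by
        rw [← hd, List.drop_drop, Nat.add_comm]
      by_cases hbrk : 0 < groups ∧ groups ≤ ((parts.length + 1 : Nat) : Int)
      · have hgrp : groups.toNat - parts.length = 1 := by omega
        simp only [fgA_loop, hi, if_true, List.length_append, List.length_singleton,
          hslice, hd]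
        rw [if_pos (by exact_mod_cast hbrk)]
        simp [fgChunks, hbrk.1, hgrp]
      · have hrec : ¬(0 < groups ∧ groups ≤ ((parts.length : Int) + 1)) := by
          push_cast at hbrk; exact hbrk
        simp only [fgA_loop, hi, if_true, List.length_append, List.length_singleton,
          hslice, hd]
        rw [if_neg (by push_cast; exact hrec)]
        have hstep : i + gs.toNat = i + (gp + 1) := by omega
        rw [hstep, ih (i + (gp + 1)) (parts ++ [(c :: cs).take (gp + 1)]) (by omega)
          (by intro hg; simp only [List.length_append, List.length_singleton]; push_cast; omega)]
        by_cases hg : 0 < groups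
        · have hr2 : ¬(groups.toNat - parts.length ≤ 1) := by omega
          simp only [hg, if_true, List.length_append, List.length_singleton]
          have harith : groups.toNat - parts.length - 1 = groups.toNat - (parts.length + 1) := by
            omega
          rw [show fgChunks gp (some (groups.toNat - parts.length)) (c :: cs) =
              (c :: cs).take (gp + 1) ::
                fgChunks gp (some (groups.toNat - parts.length - 1)) ((c :: cs).drop (gp + 1))
            from by rw [fgChunks]; simp [hr2]]
          rw [hdd, harith]
          simp [List.append_assoc]
        · simp only [hg, if_false]
          rw [show fgChunks gp none (c :: cs) =
              (c :: cs).take (gp + 1) :: fgChunks gp none ((c :: cs).drop (gp + 1))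
            from by rw [fgChunks]]
          rw [hdd]
          simp [List.append_assoc]
    · have hd : text.drop i = [] := List.drop_eq_nil_of_le (by omega)
      simp [fgA_loop, hi, hd, fgChunks_nil]

theorem fgB_inner (gs groups : Int) (gp : Nat) (hgp : gs = ((gp + 1 : Nat) : Int))
    (sep : List Char) :
    ∀ (rest : List Char) (k j : Nat), 1 ≤ j → j ≤ gp + 1 →
      ¬(0 < groups ∧ groups ≤ (k : Int)) →
      fgB_loop gs groups sep (PySem.List.enumerate rest ((k * (gp + 1) + j : Nat) : Int)) =
        rest.take (gp + 1 - j) ++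
          fgB_loop gs groups sep
            (PySem.List.enumerate (rest.drop (gp + 1 - j)) (((k + 1) * (gp + 1) : Nat) : Int)) := by
  intro rest
  induction rest with
  | nil => intro k j h1 h2 hk; simp [PySem.List.enumerate, fgB_loop]
  | cons c rest ih =>
    intro k j h1 h2 hk
    by_cases hj : j = gp + 1
    · subst hj
      have : k * (gp + 1) + (gp + 1) = (k + 1) * (gp + 1) := by ring
      rw [this]
      simp
    · have hjlt : j < gp + 1 := by omega
      rw [PySem.List.enumerate_cons]
      have hdivm : PySem.Int.floordiv ((k * (gp + 1) + j : Nat) : Int) gs = (k : Int) := by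
        rw [hgp, PySem.Int.floordiv_natCast]
        congr 1
        rw [Nat.mul_comm k, Nat.mul_add_div (by omega), Nat.div_eq_of_lt hjlt]
        omega
      have hmodm : PySem.Int.mod ((k * (gp + 1) + j : Nat) : Int) gs = (j : Int) := by
        rw [hgp, PySem.Int.mod_natCast]
        congr 1
        rw [Nat.mul_comm k, Nat.mul_add_mod, Nat.mod_eq_of_lt hjlt]
      rw [fgB_loop]
      rw [if_neg (by rw [hdivm]; exact hk), hmodm]
      rw [if_neg (by push_cast; omega)]
      have hnext : ((k * (gp + 1) + j : Nat) : Int) + 1 = ((k * (gp + 1) + (j + 1) : Nat) : Int) := by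
        push_cast; ring
      rw [hnext, ih k (j + 1) (by omega) (by omega) hk]
      have e1 : gp + 1 - j = (gp - j) + 1 := by omega
      have e2 : gp + 1 - (j + 1) = gp - j := by omega
      rw [e1, e2]
      simp

theorem fgB_boundary (gs groups : Int) (gp : Nat) (hgp : gs = ((gp + 1 : Nat) : Int))
    (sep : List Char) (cs : List Char) (k : Nat) :
    fgB_loop gs groups sep (PySem.List.enumerate cs ((k * (gp + 1) : Nat) : Int)) =
      if cs = [] then []
      else if 0 < groups ∧ groups ≤ (k : Int) then []
      else (if 0 < k then sep else []) ++ cs.take (gp + 1) ++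
        fgB_loop gs groups sep
          (PySem.List.enumerate (cs.drop (gp + 1)) (((k + 1) * (gp + 1) : Nat) : Int)) := by
  cases cs with
  | nil => simp [PySem.List.enumerate, fgB_loop]
  | cons c rest =>
    rw [if_neg (by simp)]
    rw [PySem.List.enumerate_cons]
    have hdivm : PySem.Int.floordiv ((k * (gp + 1) : Nat) : Int) gs = (k : Int) := by
      rw [hgp, PySem.Int.floordiv_natCast]
      congr 1
      exact Nat.mul_div_cancel k (by omega)
    have hmodm : PySem.Int.mod ((k * (gp + 1) : Nat) : Int) gs = 0 := by
      rw [hgp, PySem.Int.mod_natCast]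
      norm_cast
      exact Nat.mul_mod_left k (gp + 1)
    rw [fgB_loop, hdivm]
    by_cases hbrk : 0 < groups ∧ groups ≤ (k : Int)
    · rw [if_pos hbrk, if_pos hbrk]
    · rw [if_neg hbrk, if_neg hbrk, hmodm]
      have hpos : (0 < ((k * (gp + 1) : Nat) : Int) ∧ (0 : Int) = 0) ↔ 0 < k := by
        constructor
        · rintro ⟨h, -⟩
          rcases Nat.eq_zero_or_pos k with h0 | h0
          · subst h0; simp at h
          · exact h0
        · intro h
          exact ⟨by exact_mod_cast Nat.mul_pos h (Nat.succ_pos gp), rfl⟩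
      have hnext : ((k * (gp + 1) : Nat) : Int) + 1 = ((k * (gp + 1) + 1 : Nat) : Int) := by
        push_cast; ring
      rw [hnext, fgB_inner gs groups gp hgp sep rest k 1 (by omega) (by omega) hbrk]
      by_cases hk0 : 0 < k
      · rw [if_pos (by rw [hpos]; exact hk0)]
        rw [if_pos hk0]
        simp
      · rw [if_neg (by rw [hpos]; exact hk0)]
        rw [if_neg hk0]
        simp

theorem fgB_eq_chunks (gs groups : Int) (gp : Nat) (hgp : gs = ((gp + 1 : Nat) : Int))
    (sep : List Char) :
    ∀ (cs : List Char) (k : Nat), (0 < groups → (k : Int) < groups) →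
      fgB_loop gs groups sep (PySem.List.enumerate cs ((k * (gp + 1) : Nat) : Int)) =
        (if 0 < k ∧ cs ≠ [] then sep else []) ++
          PySem.Chars.join sep
            (fgChunks gp (if 0 < groups then some (groups.toNat - k) else none) cs) := by
  intro cs
  induction hn : cs.length using Nat.strong_induction_on generalizing cs with
  | _ n ih =>
    intro k hk
    cases cs with
    | nil => simp [PySem.List.enumerate, fgB_loop, fgChunks_nil, PySem.Chars.join_nil]
    | cons c rest =>
      subst hn
      have hnb : ¬(0 < groups ∧ groups ≤ (k : Int)) := by
        rintro ⟨h1, h2⟩; exact absurd (hk h1) (by omega)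
      rw [fgB_boundary gs groups gp hgp sep (c :: rest) k]
      rw [if_neg (by simp), if_neg hnb]
      by_cases hlast : 0 < groups ∧ groups.toNat - k ≤ 1
      · -- this is the last allowed group: recursion is cut off
        have hstop : fgB_loop gs groups sep
            (PySem.List.enumerate ((c :: rest).drop (gp + 1)) (((k + 1) * (gp + 1) : Nat) : Int)) = [] := by
          rw [fgB_boundary gs groups gp hgp sep _ (k + 1)]
          rcases h : (c :: rest).drop (gp + 1) with _ | ⟨d, ds⟩
          · simp
          · rw [if_neg (by simp)]
            rw [if_pos ⟨hlast.1, by have := hk hlast.1; push_cast; omega⟩]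
        rw [hstop]
        have hch : fgChunks gp (if 0 < groups then some (groups.toNat - k) else none) (c :: rest) =
            [(c :: rest).take (gp + 1)] := by
          rw [if_pos hlast.1, fgChunks, if_pos hlast.2]
        rw [hch, PySem.Chars.join_singleton]
        simp
      · -- more groups may follow
        have hkk : 0 < groups → ((k + 1 : Nat) : Int) < groups := by
          intro h; push_cast; omega
        have hlt : ((c :: rest).drop (gp + 1)).length < (c :: rest).length := by
          simp only [List.length_drop, List.length_cons]
          omega
        rw [ih _ hlt _ rfl (k + 1) hkk]
        have hch : fgChunks gp (if 0 < groups then some (groups.toNat - k) else none) (c :: rest) =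
            (c :: rest).take (gp + 1) ::
              fgChunks gp (if 0 < groups then some (groups.toNat - (k + 1)) else none)
                ((c :: rest).drop (gp + 1)) := by
          by_cases hg : 0 < groups
          · have e : groups.toNat - k - 1 = groups.toNat - (k + 1) := by omega
            rw [if_pos hg, if_pos hg, fgChunks, if_neg (by omega), e]
          · rw [if_neg hg, if_neg hg, fgChunks]
        rw [hch]
        rcases h : (c :: rest).drop (gp + 1) with _ | ⟨d, ds⟩
        · by_cases hk0 : 0 < k <;>
            simp [hk0, fgChunks_nil, PySem.Chars.join_singleton]
        · have hjoin : PySem.Chars.join sep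
              ((c :: rest).take (gp + 1) ::
                fgChunks gp (if 0 < groups then some (groups.toNat - (k + 1)) else none) (d :: ds)) =
              (c :: rest).take (gp + 1) ++ sep ++
                PySem.Chars.join sep
                  (fgChunks gp (if 0 < groups then some (groups.toNat - (k + 1)) else none) (d :: ds)) := by
            rcases hne : fgChunks gp (if 0 < groups then some (groups.toNat - (k + 1)) else none) (d :: ds)
                with _ | ⟨p, ps⟩
            · exact absurd hne (fgChunks_ne_nil _ _ _ (by simp))
            · rw [PySem.Chars.join_cons_cons]
          rw [hjoin]
          rw [if_pos (show 0 < k + 1 ∧ d :: ds ≠ [] from ⟨by omega, by simp⟩)]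
          by_cases hk0 : 0 < k <;> simp [hk0, List.append_assoc]

-- ===== VERDICT (by name: the statement is the Claim_ definition above) =====
theorem format_grouped_spec : Claim_equal_format_grouped := by
  intro text gs groups sep _
  unfold Spec_format_grouped format_grouped format_grouped_alt
  by_cases hgs : gs ≤ 0
  · simp [hgs]
  · simp only [hgs, if_false]
    have hgp : gs = ((gs.toNat - 1 + 1 : Nat) : Int) := by push_cast; omega
    set gp := gs.toNat - 1 with hgpdef
    rw [fgA_loop_eq text.toList gs groups gp hgp (text.toList.length + 1) 0 [] (by omega)
        (by intro h; simpa using h)]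
    have hB := fgB_eq_chunks gs groups gp hgp sep.toList text.toList 0
        (by intro h; simpa using h)
    simp only [Nat.zero_mul, Nat.cast_zero] at hB
    rw [hB]
    simp [Int.lt_iff_add_one_le]
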